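-- pv_equiv track=rewrite | github.com/Nik06Cu/EjerciciosCursoHardvard | plates.py | puncValidation
-- ===== SOURCE A (Python) =====
-- import string
--
-- def puncValidation(plate):
--
--     error = 0
--     retorno = list()
--     for letter in plate:
--         for signos in string.punctuation:
--             if signos in letter:
--
--                  error = 1
--                  break
--
--     if error == 1:
--         bolean = False
--         mensaje = "Invalid. It hasn't contain any punctuation sign"
--
--     else:
--         bolean = True
--         mensaje = "Ok"
--
--     retorno = [bolean, mensaje]
--     return retorno
-- ===== SOURCE B (Python) =====
-- import string
--
-- def puncValidation(plate):
--     # Set intersection instead of the nested char-by-char scan.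
--     found = set(plate) & set(string.punctuation)
--     if found:
--         bolean = False
--         mensaje = "Invalid. It hasn't contain any punctuation sign"
--     else:
--         bolean = True
--         mensaje = "Ok"
--     return [bolean, mensaje]
-- ===== Notes on version B (the rewrite author's own statement) =====
-- stated objective: simpler
-- what changed: Replaces the nested per-character scan over string.punctuation (with an error flag and break) by one set intersection set(plate) & set(string.punctuation) tested for emptiness.
import Mathlib
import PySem

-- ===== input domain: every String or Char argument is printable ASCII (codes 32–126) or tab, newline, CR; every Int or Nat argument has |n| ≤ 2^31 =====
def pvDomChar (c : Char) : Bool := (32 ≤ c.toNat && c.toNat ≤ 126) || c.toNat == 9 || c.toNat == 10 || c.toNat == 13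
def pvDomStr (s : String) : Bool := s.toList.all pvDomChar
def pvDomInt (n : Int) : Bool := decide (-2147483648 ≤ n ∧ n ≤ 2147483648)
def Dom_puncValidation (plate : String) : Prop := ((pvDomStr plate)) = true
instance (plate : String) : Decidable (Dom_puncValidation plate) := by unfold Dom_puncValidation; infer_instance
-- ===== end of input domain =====

-- B replaces A's nested per-character scan over string.punctuation by one set intersection tested for emptiness (simpler).


-- string.punctuation
def pvPunct : List Char := "!\"#$%&'()*+,-./:;<=>?@[\\]^_`{|}~".toList

-- ===== PORT A =====
-- inner 'for signos in string.punctuation: if signos in letter: error = 1; break'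
-- ('signos in letter' is Python substring containment of two one-char strings: PySem.Chars.isIn;
--  the pair carries (error, broken-flag) to model the break)
def pvInner (error : Int) (letter : Char) : Int :=
  (pvPunct.foldl
    (fun st signos =>
      if st.2 then st
      else if PySem.Chars.isIn [signos] [letter] then ((1 : Int), true) else st)
    (error, false)).1

def puncValidation (plate : String) : Bool × String :=
  let error : Int := plate.toList.foldl pvInner 0
  if error = 1 then (false, "Invalid. It hasn't contain any punctuation sign")
  else (true, "Ok")

-- ===== PORT B =====
def puncValidation_alt (plate : String) : Bool × String :=
  let found : PySem.Set Char :=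
    PySem.Set.inter (PySem.Set.ofList plate.toList) (PySem.Set.ofList pvPunct)
  if found ≠ [] then (false, "Invalid. It hasn't contain any punctuation sign")
  else (true, "Ok")

-- ===== PRECONDITION & SPEC =====
def Spec_puncValidation (plate : String) (out : Bool × String) : Prop := out = puncValidation_alt plate
instance (plate : String) (out : Bool × String) : Decidable (Spec_puncValidation plate out) := by unfold Spec_puncValidation; infer_instance

-- ===== CLAIM (what is proved, stated in full; the proofs are below) =====
def Claim_equal_puncValidation : Prop := ∀ (plate : String), Dom_puncValidation plate → Spec_puncValidation plate (puncValidation plate)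

-- ===== LEMMAS AND PROOFS =====

-- the break-fold keeps (1, true) once broken
lemma pvFold_broken (l : List Char) (letter : Char) (x : Int) :
    (l.foldl
      (fun st signos =>
        if st.2 then st
        else if PySem.Chars.isIn [signos] [letter] then ((1 : Int), true) else st)
      (x, true)) = (x, true) := by
  induction l with
  | nil => rfl
  | cons s l ih => simpa using ih

-- the inner loop sets error to 1 iff letter occurs in the punctuation list
lemma pvInner_eq (error : Int) (letter : Char) :
    pvInner error letter = if letter ∈ pvPunct then 1 else error := by
  unfold pvInner
  have h : ∀ (l : List Char) (e : Int),
      (l.foldl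
        (fun st signos =>
          if st.2 then st
          else if PySem.Chars.isIn [signos] [letter] then ((1 : Int), true) else st)
        (e, false)).1 = if letter ∈ l then 1 else e := by
    intro l
    induction l with
    | nil => intro e; simp
    | cons s l ih =>
      intro e
      by_cases hs : PySem.Chars.isIn [s] [letter] = true
      · -- [s] <:+: [letter] forces s = letter
        have hsl : s = letter := List.mem_singleton.mp
          (((PySem.Chars.isIn_iff_infix [s] [letter]).mp hs).subset (List.mem_singleton_self s))
        subst hsl
        simp only [List.foldl_cons, hs, Bool.false_eq_true, if_false, if_true, pvFold_broken]
        rw [if_pos (List.mem_cons_self)]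
      · have hne : letter ≠ s := fun h => hs (h ▸ (PySem.Chars.isIn_iff_infix [s] [s]).mpr (List.infix_refl _))
        simp only [List.foldl_cons, hs, Bool.false_eq_true, if_false, ih]
        by_cases hm : letter ∈ l
        · rw [if_pos hm, if_pos (List.mem_cons_of_mem s hm)]
        · rw [if_neg hm, if_neg (by rw [List.mem_cons]; rintro (h | h); exacts [hne h, hm h])]
  exact h pvPunct error
lemma pvOuter_eq (l : List Char) (e : Int) :
    l.foldl pvInner e = if ∃ c ∈ l, c ∈ pvPunct then 1 else e := by
  induction l generalizing e with
  | nil =>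
    simp only [List.foldl_nil]
    rw [if_neg]; rintro ⟨c, hc, -⟩; exact List.not_mem_nil hc
  | cons c l ih =>
    simp only [List.foldl_cons, pvInner_eq, ih]
    by_cases hc : c ∈ pvPunct <;> by_cases hl : ∃ x ∈ l, x ∈ pvPunct
    · rw [if_pos hl, if_pos (by rcases hl with ⟨x, hx, hp⟩; exact ⟨x, List.mem_cons_of_mem _ hx, hp⟩)]
    · rw [if_neg hl, if_pos hc, if_pos ⟨c, List.mem_cons_self, hc⟩]
    · rw [if_pos hl, if_pos (by rcases hl with ⟨x, hx, hp⟩; exact ⟨x, List.mem_cons_of_mem _ hx, hp⟩)]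
    · rw [if_neg hl, if_neg hc, if_neg (by rintro ⟨x, hx, hp⟩; rcases List.mem_cons.mp hx with rfl | hx; exacts [hc hp, hl ⟨x, hx, hp⟩])]

-- the intersection is empty iff no char of the plate is punctuation
lemma pvInter_empty_iff (l : List Char) :
    PySem.Set.inter (PySem.Set.ofList l) (PySem.Set.ofList pvPunct) = [] ↔
      ¬ ∃ c ∈ l, c ∈ pvPunct := by
  rw [List.eq_nil_iff_forall_not_mem]
  constructor
  · intro h ⟨c, hc, hp⟩
    exact h c ((PySem.Set.mem_inter _ _ c).mpr
      ⟨(PySem.Set.mem_ofList _ _).mpr hc, (PySem.Set.mem_ofList _ _).mpr hp⟩)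
  · intro h c hm
    rcases (PySem.Set.mem_inter _ _ c).mp hm with ⟨h1, h2⟩
    exact h ⟨c, (PySem.Set.mem_ofList _ _).mp h1, (PySem.Set.mem_ofList _ _).mp h2⟩

-- ===== VERDICT (by name: the statement is the Claim_ definition above) =====
theorem puncValidation_spec : Claim_equal_puncValidation := by
  intro plate _
  unfold Spec_puncValidation puncValidation puncValidation_alt
  simp only [pvOuter_eq]
  by_cases h : ∃ c ∈ plate.toList, c ∈ pvPunct
  · have hne : (PySem.Set.ofList plate.toList).inter (PySem.Set.ofList pvPunct) ≠ [] :=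
      fun heq => (pvInter_empty_iff plate.toList).mp heq h
    simp [h, hne]
  · simp [h, (pvInter_empty_iff plate.toList).mpr h]
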